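-- pv_equiv track=rewrite | github.com/bajajvinamr/mba-admit | backend/routers/schools.py | _fuzzy_industry_match
-- ===== SOURCE A (Python) =====
-- def _fuzzy_industry_match(target: str, keywords: list[str]) -> bool:
--     """Check for partial/fuzzy industry matches (e.g., 'tech' matches 'technology')."""
--     aliases = {
--         "tech": ["technology", "tech", "software", "engineering"],
--         "consulting": ["consulting", "management consulting", "strategy"],
--         "finance": ["finance", "banking", "investment", "financial services"],
--         "healthcare": ["healthcare", "health", "biotech", "pharma"],
--         "marketing": ["marketing", "brand management", "advertising"],
--         "entrepreneurship": ["entrepreneurship", "startup", "venture"],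
--     }
--     for group_terms in aliases.values():
--         if any(target in t or t in target for t in group_terms):
--             if any(any(kw_term in kw or kw in kw_term for kw_term in group_terms) for kw in keywords):
--                 return True
--     return False
-- ===== SOURCE B (Python) =====
-- def _fuzzy_industry_match(target: str, keywords: list[str]) -> bool:
--     """Check for partial/fuzzy industry matches (e.g., 'tech' matches 'technology')."""
--     aliases = {
--         "tech": ["technology", "tech", "software", "engineering"],
--         "consulting": ["consulting", "management consulting", "strategy"],
--         "finance": ["finance", "banking", "investment", "financial services"],
--         "healthcare": ["healthcare", "health", "biotech", "pharma"],
--         "marketing": ["marketing", "brand management", "advertising"],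
--         "entrepreneurship": ["entrepreneurship", "startup", "venture"],
--     }
--     groups = list(aliases.values())
--     # Pass 1: indices of the groups the target fuzzily matches.
--     tgt_idx = [i for i, g in enumerate(groups)
--                if any(target in t or t in target for t in g)]
--     # Pass 2 (independent): indices of the groups some keyword fuzzily matches.
--     kw_idx = [i for i, g in enumerate(groups)
--               if any(t in kw or kw in t for kw in keywords for t in g)]
--     # Match iff the two index sets intersect.
--     return any(i in kw_idx for i in tgt_idx)
-- ===== Notes on version B (the rewrite author's own statement) =====
-- stated objective: alternative
-- what changed: Replaces A's fused per-group loop (check target match, then scan keywords, early-return) by two independent enumerate passes that build the index list of groups matched by the target and the index list of groups matched by any keyword, returning whether the two index lists intersect.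
import Mathlib
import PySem

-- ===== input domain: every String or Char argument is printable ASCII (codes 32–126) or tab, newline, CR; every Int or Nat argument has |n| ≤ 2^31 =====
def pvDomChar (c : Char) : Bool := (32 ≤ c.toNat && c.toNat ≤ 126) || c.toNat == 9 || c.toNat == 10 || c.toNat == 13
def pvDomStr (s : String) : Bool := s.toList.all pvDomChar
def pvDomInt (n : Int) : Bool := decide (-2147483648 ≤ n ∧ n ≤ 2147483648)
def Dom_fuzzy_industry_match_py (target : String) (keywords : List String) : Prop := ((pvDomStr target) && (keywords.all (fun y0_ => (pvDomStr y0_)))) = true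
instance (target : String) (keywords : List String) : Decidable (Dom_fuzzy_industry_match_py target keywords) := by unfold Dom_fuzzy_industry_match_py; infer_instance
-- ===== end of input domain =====

-- B replaces A's fused per-group loop (match target, then scan keywords, early return)
-- by two independent index passes (groups matched by the target / by any keyword) and an
-- index-set intersection test; objective: alternative.


-- ===== PORT A =====
-- aliases.values() in insertion order (shared literal constant)
def pvAliasGroups : List (List String) :=
  [ ["technology", "tech", "software", "engineering"],
    ["consulting", "management consulting", "strategy"],
    ["finance", "banking", "investment", "financial services"],
    ["healthcare", "health", "biotech", "pharma"],
    ["marketing", "brand management", "advertising"],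
    ["entrepreneurship", "startup", "venture"] ]

-- 'any(target in t or t in target for t in g)'
def pvTm (target : String) (g : List String) : Bool :=
  g.any (fun t => PySem.Str.isIn target t || PySem.Str.isIn t target)

-- 'any(t in kw or kw in t for kw in keywords for t in g)'
def pvKm (keywords : List String) (g : List String) : Bool :=
  keywords.any (fun kw => g.any (fun t => PySem.Str.isIn t kw || PySem.Str.isIn kw t))

-- 'for group_terms in aliases.values(): if …: if …: return True' / 'return False'
def pvALoop (target : String) (keywords : List String) : List (List String) → Bool
  | [] => false
  | g :: rest =>
      if pvTm target g then
        if pvKm keywords g then true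
        else pvALoop target keywords rest
      else pvALoop target keywords rest

def fuzzy_industry_match_py (target : String) (keywords : List String) : Bool :=
  pvALoop target keywords pvAliasGroups

-- ===== PORT B =====
-- pass 1: '[i for i, g in enumerate(groups) if any(target in t or t in target for t in g)]'
def pvTgtIdx (target : String) : List Int :=
  ((PySem.List.enumerate pvAliasGroups).filter (fun p => pvTm target p.2)).map Prod.fst

-- pass 2: '[i for i, g in enumerate(groups) if any(t in kw or kw in t for kw in keywords for t in g)]'
def pvKwIdx (keywords : List String) : List Int :=
  ((PySem.List.enumerate pvAliasGroups).filter (fun p => pvKm keywords p.2)).map Prod.fst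

-- 'return any(i in kw_idx for i in tgt_idx)'
def fuzzy_industry_match_py_alt (target : String) (keywords : List String) : Bool :=
  (pvTgtIdx target).any (fun i => (pvKwIdx keywords).contains i)

-- ===== PRECONDITION & SPEC =====
def Spec_fuzzy_industry_match_py (target : String) (keywords : List String) (out : Bool) : Prop := out = fuzzy_industry_match_py_alt target keywords
instance (target : String) (keywords : List String) (out : Bool) : Decidable (Spec_fuzzy_industry_match_py target keywords out) := by unfold Spec_fuzzy_industry_match_py; infer_instance

-- ===== CLAIM =====
def Claim_equal_fuzzy_industry_match_py : Prop := ∀ (target : String) (keywords : List String), Dom_fuzzy_industry_match_py target keywords → Spec_fuzzy_industry_match_py target keywords (fuzzy_industry_match_py target keywords)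

-- ===== LEMMAS AND PROOFS =====

-- A's loop returns true iff some group matches both the target and a keyword
theorem pvALoop_eq_any (target : String) (keywords : List String) (gs : List (List String)) :
    pvALoop target keywords gs = gs.any (fun g => pvTm target g && pvKm keywords g) := by
  induction gs with
  | nil => rfl
  | cons g rest ih =>
      simp only [pvALoop, List.any_cons, ih]
      cases pvTm target g <;> cases pvKm keywords g <;> simp

-- B's intersection of the two index lists equals the same per-group conjunction
theorem alt_eq (target : String) (keywords : List String) :
    fuzzy_industry_match_py_alt target keywords
      = pvAliasGroups.any (fun g => pvTm target g && pvKm keywords g) := by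
  rw [Bool.eq_iff_iff]
  simp only [fuzzy_industry_match_py_alt, pvTgtIdx, pvKwIdx, List.any_eq_true, List.mem_map,
    List.mem_filter, PySem.List.mem_enumerate_iff, List.contains_iff_mem,
    Bool.and_eq_true]
  constructor
  · rintro ⟨i, ⟨⟨p, ⟨⟨k, hk, rfl⟩, htm⟩, rfl⟩, q, ⟨⟨k', hk', rfl⟩, hkm⟩, hqi⟩⟩
    have : k = k' := by
      simp at hqi; omega
    subst this
    exact ⟨pvAliasGroups[k], List.getElem_mem _, htm, hkm⟩
  · rintro ⟨g, hg, htm, hkm⟩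
    obtain ⟨k, hk, rfl⟩ := List.getElem_of_mem hg
    exact ⟨(0 : Int) + k, ⟨⟨(0 + (k : Int), pvAliasGroups[k]), ⟨⟨k, hk, rfl⟩, htm⟩, rfl⟩,
      ⟨(0 + (k : Int), pvAliasGroups[k]), ⟨⟨k, hk, rfl⟩, hkm⟩, rfl⟩⟩⟩

-- ===== VERDICT =====
theorem fuzzy_industry_match_py_spec : Claim_equal_fuzzy_industry_match_py := by
  intro target keywords _
  unfold Spec_fuzzy_industry_match_py fuzzy_industry_match_py
  rw [alt_eq, pvALoop_eq_any]
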